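-- pv_equiv track=rewrite | github.com/jerge/MARL | model/sleeping.py | ungroup_transition
-- ===== SOURCE A (Python) =====
-- def ungroup_transition(grouped_transition, width, catalog):
--     transition = []
--     env_loc = 0
--     for action in grouped_transition:
--         loc = action % width
--         block = action // width
--         while loc != env_loc:
--             direction = 1 if abs((loc - env_loc) % width) < abs((env_loc - loc) % width) else -1
--             env_loc = (env_loc + direction) % width
--             transition.append([None,3,2][direction])
--         # I'm sorry
--         transition.append(([0,1] + [a + 4 for a in range(len(catalog))])[block])
--     return transition
-- ===== SOURCE B (Python) =====
-- def ungroup_transition(grouped_transition, width, catalog):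
--     codes = [0, 1] + [a + 4 for a in range(len(catalog))]
--     transition = []
--     env_loc = 0
--     for action in grouped_transition:
--         loc = action % width
--         d = (loc - env_loc) % width
--         if d != 0:
--             if 2 * d < width:
--                 transition.extend([3] * d)
--             else:
--                 transition.extend([2] * (width - d))
--             env_loc = loc
--         transition.append(codes[action // width])
--     return transition
-- ===== Notes on version B (the rewrite author's own statement) =====
-- stated objective: simpler
-- what changed: Replaces the per-step while loop (which recomputes two modular distances and abs every step) with a closed-form ring distance d=(loc-env_loc)%width per action, emitting the whole [3]*d or [2]*(width-d) block in one extend and hoisting the action-code table out of the loop.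
-- outside the precondition, e.g. on ungroup_transition([-1], -2, []): A returns [2, 0], B returns [0]; on ungroup_transition([1], -3, []): A does not finish within the time limit, B returns [1]
import Mathlib
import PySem

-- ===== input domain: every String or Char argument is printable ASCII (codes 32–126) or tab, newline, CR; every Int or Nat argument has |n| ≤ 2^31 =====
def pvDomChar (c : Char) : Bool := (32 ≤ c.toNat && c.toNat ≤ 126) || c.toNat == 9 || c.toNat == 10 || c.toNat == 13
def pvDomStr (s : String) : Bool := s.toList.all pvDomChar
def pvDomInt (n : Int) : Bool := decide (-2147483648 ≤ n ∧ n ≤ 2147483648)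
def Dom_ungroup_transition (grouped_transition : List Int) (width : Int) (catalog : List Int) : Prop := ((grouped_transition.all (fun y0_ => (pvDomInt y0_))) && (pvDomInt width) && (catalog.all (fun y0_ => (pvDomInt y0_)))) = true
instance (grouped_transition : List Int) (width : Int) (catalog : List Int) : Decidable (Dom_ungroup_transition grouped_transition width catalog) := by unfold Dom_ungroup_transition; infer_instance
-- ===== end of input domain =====

-- B replaces A's step-by-step while loop by the closed-form ring distance, emitting each
-- movement block with a single extend and hoisting the code table out of the loop (simpler).

-- ===== PORT A =====
-- A's inner while loop; fuel = width.natAbs bounds its iteration count on every input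
-- admitted by Pre_ (the loop moves monotonically around a ring of 0 < width cells), so the
-- fuel guard only makes the same computation total.
def pvLoopA (loc width : Int) : Nat → Int → List Int → Int × List Int
  | 0, env, acc => (env, acc)
  | fuel + 1, env, acc =>
    if loc ≠ env then
      -- direction = 1 if abs((loc-env)%width) < abs((env-loc)%width) else -1
      let direction : Int :=
        if |PySem.Int.mod (loc - env) width| < |PySem.Int.mod (env - loc) width| then 1 else -1
      -- [None,3,2][direction]: index 1 → 3, index -1 → 2 (Python never selects None here)
      pvLoopA loc width fuel (PySem.Int.mod (env + direction) width)
        (acc ++ [if direction = 1 then (3 : Int) else 2])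
    else (env, acc)

-- loop body of A's for loop; the ([0,1]+[a+4 …])[block] lookup is in-range under Pre_
-- (pyGetD's default is never selected there)
def pvStepA (width : Int) (catalog : List Int) (st : Int × List Int) (action : Int) : Int × List Int :=
  let loc := PySem.Int.mod action width
  let block := PySem.Int.floordiv action width
  let p := pvLoopA loc width width.natAbs st.1 st.2
  (p.1, p.2 ++ [PySem.List.pyGetD ([0, 1] ++ (List.range catalog.length).map (fun a => (a : Int) + 4)) block 0])

def ungroup_transition (grouped_transition : List Int) (width : Int) (catalog : List Int) : List Int :=
  (grouped_transition.foldl (pvStepA width catalog) ((0 : Int), ([] : List Int))).2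

-- ===== PORT B =====
-- loop body of B's for loop, over the hoisted code table
def pvStepB (codes : List Int) (width : Int) (st : Int × List Int) (action : Int) : Int × List Int :=
  let loc := PySem.Int.mod action width
  let d := PySem.Int.mod (loc - st.1) width
  let p : Int × List Int :=
    if d ≠ 0 then
      (loc, st.2 ++ (if 2 * d < width then List.replicate d.toNat 3 else List.replicate (width - d).toNat 2))
    else st
  (p.1, p.2 ++ [PySem.List.pyGetD codes (PySem.Int.floordiv action width) 0])

def ungroup_transition_alt (grouped_transition : List Int) (width : Int) (catalog : List Int) : List Int :=
  let codes : List Int := [0, 1] ++ (List.range catalog.length).map (fun a => (a : Int) + 4)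
  (grouped_transition.foldl (pvStepB codes width) ((0 : Int), ([] : List Int))).2

-- ===== PRECONDITION & SPEC =====
-- Pre_ excludes width == 0 (ZeroDivisionError), out-of-range block indices (IndexError), and
-- negative widths on which the while loop actually moves (width ∤ some action): there A either
-- diverges (the direction rule oscillates) or returns direction codes that are an accident of
-- Python's negative-modulus convention; negative widths with no movement are kept.
def Pre_ungroup_transition (grouped_transition : List Int) (width : Int) (catalog : List Int) : Prop :=
  (1 ≤ width ∨ (width ≤ -1 ∧ ∀ a ∈ grouped_transition, width ∣ a)) ∧ ∀ a ∈ grouped_transition,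
    -((catalog.length : Int) + 2) ≤ PySem.Int.floordiv a width ∧
    PySem.Int.floordiv a width < (catalog.length : Int) + 2
instance (grouped_transition : List Int) (width : Int) (catalog : List Int) : Decidable (Pre_ungroup_transition grouped_transition width catalog) := by unfold Pre_ungroup_transition; infer_instance
def pvWitness_ungroup_transition : List Int × Int × List Int := ([3, 7, 2], 5, [9, 9])
def Spec_ungroup_transition (grouped_transition : List Int) (width : Int) (catalog : List Int) (out : List Int) : Prop := out = ungroup_transition_alt grouped_transition width catalog
instance (grouped_transition : List Int) (width : Int) (catalog : List Int) (out : List Int) : Decidable (Spec_ungroup_transition grouped_transition width catalog out) := by unfold Spec_ungroup_transition; infer_instance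

-- ===== CLAIM =====
def Claim_equal_ungroup_transition : Prop := ∀ (grouped_transition : List Int) (width : Int) (catalog : List Int), Dom_ungroup_transition grouped_transition width catalog → Pre_ungroup_transition grouped_transition width catalog → Spec_ungroup_transition grouped_transition width catalog (ungroup_transition grouped_transition width catalog)


-- ===== LEMMAS AND PROOFS =====

-- the movement block A's while loop emits for ring distance d (0 ≤ d < w)
def pvPart (d w : Int) : List Int :=
  if d = 0 then [] else if 2 * d < w then List.replicate d.toNat 3 else List.replicate (w - d).toNat 2

-- number of iterations of A's while loop at ring distance d
def pvSteps (d w : Int) : Nat := if 2 * d < w then d.toNat else (w - d).toNat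

theorem pv_neg_emod (e w : Int) (hw : 0 < w) (hne : e % w ≠ 0) : (-e) % w = w - e % w := by
  have h0 := Int.emod_nonneg e (by omega : w ≠ 0)
  have h1 := Int.emod_lt_of_pos e hw
  have hq : w * (e / w) + e % w = e := Int.mul_ediv_add_emod e w
  have key : -e = (w - e % w) + w * (-(e / w) - 1) := by
    have h : (w - e % w) + w * (-(e / w) - 1) = -(w * (e / w) + e % w) := by ring
    rw [h, hq]
  rw [key, Int.add_mul_emod_self_left, Int.emod_eq_of_lt (by omega) (by omega)]

theorem pv_emod_zero_iff (e w : Int) (_hw : 0 < w) (h1 : -w < e) (h2 : e < w) :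
    e % w = 0 ↔ e = 0 := by
  constructor
  · intro h
    exact Int.eq_zero_of_abs_lt_dvd (Int.dvd_of_emod_eq_zero h) (abs_lt.mpr ⟨h1, h2⟩)
  · intro h; simp [h]

theorem pv_d_step (loc env w dir : Int) :
    (loc - (env + dir) % w) % w = (loc - env - dir) % w := by
  rw [Int.sub_emod loc ((env + dir) % w) w, Int.emod_emod_of_dvd _ dvd_rfl,
    ← Int.sub_emod]
  congr 1
  ring

theorem pv_part_fwd (x w : Int) (_h0 : 0 ≤ x) (h2 : 2 * x < w) :
    pvPart x w = List.replicate x.toNat 3 := by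
  rcases eq_or_ne x 0 with h | h
  · simp [pvPart, h]
  · rw [pvPart, if_neg h, if_pos h2]

theorem pvLoopA_eq (loc w : Int) (hw : 0 < w) (hl0 : 0 ≤ loc) (hl1 : loc < w) :
    ∀ (fuel : Nat) (env : Int) (acc : List Int), 0 ≤ env → env < w →
      pvSteps ((loc - env) % w) w ≤ fuel →
      pvLoopA loc w fuel env acc = (loc, acc ++ pvPart ((loc - env) % w) w) := by
  intro fuel
  induction fuel with
  | zero =>
    intro env acc he0 he1 hs
    have hd0 := Int.emod_nonneg (loc - env) (by omega : w ≠ 0)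
    have hd1 := Int.emod_lt_of_pos (loc - env) hw
    have hdz : (loc - env) % w = 0 := by
      unfold pvSteps at hs; split at hs <;> omega
    have hle : loc = env := by
      have := (pv_emod_zero_iff (loc - env) w hw (by omega) (by omega)).1 hdz; omega
    simp [pvLoopA, pvPart, hle]
  | succ f ih =>
    intro env acc he0 he1 hs
    by_cases hle : loc = env
    · have hdz : (loc - env) % w = 0 := by simp [hle]
      simp [pvLoopA, hle, pvPart]
    · have hd0 := Int.emod_nonneg (loc - env) (by omega : w ≠ 0)
      have hd1 := Int.emod_lt_of_pos (loc - env) hw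
      have hdz : (loc - env) % w ≠ 0 := fun h =>
        hle (by have := (pv_emod_zero_iff (loc - env) w hw (by omega) (by omega)).1 h; omega)
      have hw2 : 2 ≤ w := by omega
      have hone : (1 : Int) % w = 1 := Int.emod_eq_of_lt (by omega) (by omega)
      have hneg : (env - loc) % w = w - (loc - env) % w := by
        have h : env - loc = -(loc - env) := by ring
        rw [h, pv_neg_emod (loc - env) w hw hdz]
      simp only [pvLoopA, PySem.Int.mod_eq_emod_of_pos hw, hneg,
        abs_of_nonneg hd0, abs_of_nonneg (by omega : (0:Int) ≤ w - (loc - env) % w),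
        if_pos (hle : loc ≠ env)]
      by_cases hdir : 2 * ((loc - env) % w) < w
      · -- forward step: direction = 1
        rw [if_pos (by omega : (loc - env) % w < w - (loc - env) % w)]
        simp only [if_true]
        have hb0 := Int.emod_nonneg (env + 1) (by omega : w ≠ 0)
        have hb1 := Int.emod_lt_of_pos (env + 1) hw
        have hd' : (loc - (env + 1) % w) % w = (loc - env) % w - 1 := by
          rw [pv_d_step loc env w 1]
          have h : loc - env - 1 = (loc - env) - 1 := by ring
          rw [h, Int.sub_emod (loc - env) 1 w, hone,
            Int.emod_eq_of_lt (by omega) (by omega)]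
        rw [ih ((env + 1) % w) (acc ++ [3]) hb0 hb1 (by
          rw [hd']
          unfold pvSteps at hs ⊢
          split at hs <;> split <;> omega)]
        rw [hd', pv_part_fwd _ w (by omega) (by omega),
          pv_part_fwd _ w (by omega) hdir]
        have h : ((loc - env) % w).toNat = ((loc - env) % w - 1).toNat + 1 := by omega
        rw [h, List.replicate_succ]
        simp
      · -- backward step: direction = -1
        rw [if_neg (by omega : ¬ (loc - env) % w < w - (loc - env) % w)]
        simp only [if_neg (by decide : ¬ (-1 : Int) = 1)]
        have hb0 := Int.emod_nonneg (env + -1) (by omega : w ≠ 0)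
        have hb1 := Int.emod_lt_of_pos (env + -1) hw
        have hd' : (loc - (env + -1) % w) % w = ((loc - env) % w + 1) % w := by
          rw [pv_d_step loc env w (-1)]
          have h : loc - env - (-1) = (loc - env) + 1 := by ring
          rw [h, Int.add_emod (loc - env) 1 w, hone]
        by_cases hdw : (loc - env) % w + 1 = w
        · have hd0' : (loc - (env + -1) % w) % w = 0 := by
            rw [hd', hdw, Int.emod_self]
          rw [ih ((env + -1) % w) (acc ++ [2]) hb0 hb1 (by
            rw [hd0']; unfold pvSteps
            rw [if_pos (by omega)]; omega)]
          rw [hd0']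
          unfold pvPart
          rw [if_pos rfl, if_neg hdz, if_neg hdir]
          have h : (w - (loc - env) % w).toNat = 1 := by omega
          rw [h]
          simp
        · have hd1' : (loc - (env + -1) % w) % w = (loc - env) % w + 1 := by
            rw [hd', Int.emod_eq_of_lt (by omega) (by omega)]
          rw [ih ((env + -1) % w) (acc ++ [2]) hb0 hb1 (by
            rw [hd1']
            unfold pvSteps at hs ⊢
            rw [if_neg (by omega)]
            split at hs <;> omega)]
          rw [hd1']
          unfold pvPart
          rw [if_neg (by omega), if_neg (by omega), if_neg hdz, if_neg hdir]
          have h : (w - (loc - env) % w).toNat = (w - ((loc - env) % w + 1)).toNat + 1 := by omega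
          rw [h, List.replicate_succ]
          simp

theorem pvStep_eq (w : Int) (hw : 0 < w) (catalog : List Int) (st : Int × List Int)
    (action : Int) (h0 : 0 ≤ st.1) (h1 : st.1 < w) :
    pvStepA w catalog st action =
      pvStepB ([0, 1] ++ (List.range catalog.length).map (fun a => (a : Int) + 4)) w st action := by
  have hl0 := Int.emod_nonneg action (by omega : w ≠ 0)
  have hl1 := Int.emod_lt_of_pos action hw
  have hd0 := Int.emod_nonneg (action % w - st.1) (by omega : w ≠ 0)
  have hd1 := Int.emod_lt_of_pos (action % w - st.1) hw
  simp only [pvStepA, pvStepB, PySem.Int.mod_eq_emod_of_pos hw]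
  rw [pvLoopA_eq (action % w) w hw hl0 hl1 w.natAbs st.1 st.2 h0 h1 (by
    unfold pvSteps; split <;> omega)]
  by_cases hdz : (action % w - st.1) % w = 0
  · have heq : action % w = st.1 := by
      have := (pv_emod_zero_iff (action % w - st.1) w hw (by omega) (by omega)).1 hdz
      omega
    rw [if_neg (not_not_intro hdz), hdz]
    simp [pvPart, heq]
  · rw [if_pos hdz]
    rw [pvPart, if_neg hdz]

theorem pvStepB_bounds (codes : List Int) (w : Int) (hw : 0 < w) (st : Int × List Int)
    (action : Int) (h0 : 0 ≤ st.1) (h1 : st.1 < w) :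
    0 ≤ (pvStepB codes w st action).1 ∧ (pvStepB codes w st action).1 < w := by
  have hl0 := Int.emod_nonneg action (by omega : w ≠ 0)
  have hl1 := Int.emod_lt_of_pos action hw
  simp only [pvStepB, PySem.Int.mod_eq_emod_of_pos hw]
  split <;> constructor <;> simp_all

theorem pvLoopA_zero (w : Int) (fuel : Nat) (acc : List Int) :
    pvLoopA 0 w fuel 0 acc = (0, acc) := by
  cases fuel <;> simp [pvLoopA]

theorem pvFold_eq_neg (w : Int) (_hw : w ≤ -1) (catalog : List Int) :
    ∀ (gt : List Int) (st : Int × List Int), st.1 = 0 → (∀ a ∈ gt, w ∣ a) →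
      gt.foldl (pvStepA w catalog) st =
        gt.foldl (pvStepB ([0, 1] ++ (List.range catalog.length).map (fun a => (a : Int) + 4)) w) st := by
  intro gt
  induction gt with
  | nil => intro st h0 hdvd; rfl
  | cons a gt ih =>
    intro st h0 hdvd
    have hl : PySem.Int.mod a w = 0 :=
      (PySem.Int.mod_eq_zero_iff_dvd a w).2 (hdvd a (List.mem_cons_self))
    have hstep : pvStepA w catalog st a =
        pvStepB ([0, 1] ++ (List.range catalog.length).map (fun a => (a : Int) + 4)) w st a := by
      simp only [pvStepA, pvStepB, hl, h0, sub_zero]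
      rw [pvLoopA_zero, (PySem.Int.mod_eq_zero_iff_dvd 0 w).2 (dvd_zero w)]
      simp [h0]
    rw [List.foldl_cons, List.foldl_cons, hstep]
    have h0' : ((pvStepB ([0, 1] ++ (List.range catalog.length).map (fun a => (a : Int) + 4)) w st a)).1 = 0 := by
      simp [pvStepB, hl, h0, (PySem.Int.mod_eq_zero_iff_dvd 0 w).2 (dvd_zero w)]
    exact ih _ h0' (fun x hx => hdvd x (List.mem_cons_of_mem a hx))

theorem pvFold_eq (w : Int) (hw : 0 < w) (catalog : List Int) :
    ∀ (gt : List Int) (st : Int × List Int), 0 ≤ st.1 → st.1 < w →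
      gt.foldl (pvStepA w catalog) st =
        gt.foldl (pvStepB ([0, 1] ++ (List.range catalog.length).map (fun a => (a : Int) + 4)) w) st := by
  intro gt
  induction gt with
  | nil => intro st h0 h1; rfl
  | cons a gt ih =>
    intro st h0 h1
    rw [List.foldl_cons, List.foldl_cons, pvStep_eq w hw catalog st a h0 h1]
    exact ih _ (pvStepB_bounds _ w hw st a h0 h1).1 (pvStepB_bounds _ w hw st a h0 h1).2

-- ===== VERDICT =====
theorem ungroup_transition_spec : Claim_equal_ungroup_transition := by
  intro gt w catalog _ hpre
  unfold Spec_ungroup_transition ungroup_transition ungroup_transition_alt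
  rcases hpre.1 with hw | ⟨hw, hdvd⟩
  · rw [pvFold_eq w (by omega) catalog gt ((0 : Int), ([] : List Int)) le_rfl (by omega)]
  · rw [pvFold_eq_neg w hw catalog gt ((0 : Int), ([] : List Int)) rfl hdvd]
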